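-- pv_equiv track=rewrite | github.com/upesacm/21DaysOfCode-2024 | DSA/saumya_day2/day2_ques2.py | rank_after_each_round
-- ===== SOURCE A (Python) =====
-- def rank_after_each_round(leaderboard, player_score):
--     if leaderboard is None or player_score is None:
--         return None
--     rank = [0] * len(player_score)
--
--     for i in range(len(player_score)):
--         count = 0
--         j = 0
--         while j < len(leaderboard) and player_score[i] < leaderboard[j]:
--             if j < len(leaderboard) - 1 and leaderboard[j] == leaderboard[j + 1]:
--                 j += 1
--                 continue
--             count += 1
--             j += 1
--         rank[i] = count + 1
--     return rank
-- ===== SOURCE B (Python) =====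
-- def rank_after_each_round(leaderboard, player_score):
--     if leaderboard is None or player_score is None:
--         return None
--     # collapse adjacent equal scores once
--     dedup = []
--     for x in leaderboard:
--         if not dedup or dedup[-1] != x:
--             dedup.append(x)
--     # prefix minima of the collapsed board (non-increasing by construction)
--     pmin = []
--     for x in dedup:
--         pmin.append(x if not pmin or x < pmin[-1] else pmin[-1])
--     # binary search: first index with pmin[idx] <= s
--     res = []
--     for s in player_score:
--         lo, hi = 0, len(pmin)
--         while lo < hi:
--             mid = (lo + hi) // 2
--             if s < pmin[mid]:
--                 lo = mid + 1
--             else: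
--                 hi = mid
--         res.append(lo + 1)
--     return res
-- ===== Notes on version B (the rewrite author's own statement) =====
-- stated objective: faster
-- what changed: A rescans the whole leaderboard per score while skipping adjacent duplicates inline; B precomputes the adjacent-deduplicated leaderboard and its prefix-minimum table once, then answers each score with a binary search on that non-increasing table.
import Mathlib
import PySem

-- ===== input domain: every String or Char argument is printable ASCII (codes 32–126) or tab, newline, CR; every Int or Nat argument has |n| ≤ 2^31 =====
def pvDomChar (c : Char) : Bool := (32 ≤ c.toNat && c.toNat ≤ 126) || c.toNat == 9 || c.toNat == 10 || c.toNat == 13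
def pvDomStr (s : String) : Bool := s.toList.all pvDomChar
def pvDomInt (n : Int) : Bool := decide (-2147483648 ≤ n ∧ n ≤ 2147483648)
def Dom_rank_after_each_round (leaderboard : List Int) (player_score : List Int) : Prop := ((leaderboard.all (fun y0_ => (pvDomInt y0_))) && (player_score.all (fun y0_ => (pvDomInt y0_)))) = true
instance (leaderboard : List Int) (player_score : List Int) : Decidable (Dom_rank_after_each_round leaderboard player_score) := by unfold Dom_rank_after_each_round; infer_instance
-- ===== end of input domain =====

-- B replaces A's per-score rescan of the whole leaderboard (with inline duplicate skipping)
-- by a precomputed adjacent-dedup + prefix-minimum table queried by binary search per score.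

-- ===== PORT A =====
-- the while loop: j scans leaderboard while player_score[i] < leaderboard[j];
-- ported structurally on the suffix starting at j (lookahead for leaderboard[j+1])
def pvALoop (s : Int) : List Int → Int → Int
  | [], count => count
  | x :: rest, count =>
    if s < x then
      match rest with
      | [] => pvALoop s [] (count + 1)
      | y :: rest' =>
        if x = y then pvALoop s (y :: rest') count
        else pvALoop s (y :: rest') (count + 1)
    else count

def rank_after_each_round (leaderboard : List Int) (player_score : List Int) : List Int :=
  player_score.map (fun s => pvALoop s leaderboard 0 + 1)

-- ===== PORT B =====
-- 'for x in leaderboard: if not dedup or dedup[-1] != x: dedup.append(x)'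
def pvBDedup (leaderboard : List Int) : List Int :=
  leaderboard.foldl
    (fun dedup x =>
      if dedup = [] ∨ dedup.getLast? ≠ some x then dedup ++ [x] else dedup) []

-- 'for x in dedup: pmin.append(x if not pmin or x < pmin[-1] else pmin[-1])'
def pvBPmin (dedup : List Int) : List Int :=
  dedup.foldl
    (fun pmin x =>
      pmin ++ [match pmin.getLast? with
               | none => x
               | some m => if x < m then x else m]) []

-- the 'while lo < hi' binary search; pmin[mid] is always in range, ported as getD
def pvBSearch (pmin : List Int) (s : Int) (lo hi : Nat) : Nat :=
  if _h : lo < hi then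
    let mid := (lo + hi) / 2
    if s < pmin.getD mid 0 then pvBSearch pmin s (mid + 1) hi
    else pvBSearch pmin s lo mid
  else lo
termination_by hi - lo
decreasing_by all_goals omega

def rank_after_each_round_alt (leaderboard : List Int) (player_score : List Int) : List Int :=
  let pmin := pvBPmin (pvBDedup leaderboard)
  player_score.map (fun s => (pvBSearch pmin s 0 pmin.length : Int) + 1)

-- ===== PRECONDITION & SPEC =====
def Spec_rank_after_each_round (leaderboard : List Int) (player_score : List Int) (out : List Int) : Prop := out = rank_after_each_round_alt leaderboard player_score
instance (leaderboard : List Int) (player_score : List Int) (out : List Int) : Decidable (Spec_rank_after_each_round leaderboard player_score out) := by unfold Spec_rank_after_each_round; infer_instance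

-- ===== CLAIM (what is proved, stated in full; the proofs are below) =====
def Claim_equal_rank_after_each_round : Prop := ∀ (leaderboard : List Int) (player_score : List Int), Dom_rank_after_each_round leaderboard player_score → Spec_rank_after_each_round leaderboard player_score (rank_after_each_round leaderboard player_score)

-- ===== LEMMAS AND PROOFS =====

/-- Recursive form of the dedup loop from a previous kept element `prev`. -/
def pvDA (prev : Int) : List Int → List Int
  | [] => []
  | x :: xs => if x = prev then pvDA prev xs else x :: pvDA x xs

/-- Recursive form of the prefix-min loop from current minimum `m`. -/
def pvPM (m : Int) : List Int → List Int
  | [] => []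
  | x :: xs => (if x < m then x else m) :: pvPM (if x < m then x else m) xs

/-- length of the `s < ·` prefix. -/
def pvTW (s : Int) (l : List Int) : Nat := (l.takeWhile (fun x => s < x)).length

theorem pvBDedup_eq_aux :
    ∀ (l acc : List Int) (x0 : Int),
      List.foldl
        (fun dedup x =>
          if dedup = [] ∨ dedup.getLast? ≠ some x then dedup ++ [x] else dedup)
        (acc ++ [x0]) l = acc ++ [x0] ++ pvDA x0 l := by
  intro l
  induction l with
  | nil => intro acc x0; simp [pvDA]
  | cons x xs ih =>
    intro acc x0
    have hl : (acc ++ [x0]).getLast? = some x0 := by simp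
    simp only [List.foldl_cons]
    by_cases hx : x0 = x
    · rw [if_neg (by simp [hx])]
      rw [ih acc x0]
      have : pvDA x0 (x :: xs) = pvDA x0 xs := by simp [pvDA, hx.symm]
      rw [this]
    · rw [if_pos (Or.inr (by simp; exact hx))]
      have h2 := ih (acc ++ [x0]) x
      rw [h2]
      have : pvDA x0 (x :: xs) = x :: pvDA x xs := by
        simp only [pvDA]; rw [if_neg (fun h : x = x0 => hx h.symm)]
      rw [this]
      simp

theorem pvBDedup_cons (x : Int) (l : List Int) :
    pvBDedup (x :: l) = x :: pvDA x l := by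
  have h := pvBDedup_eq_aux l [] x
  simpa [pvBDedup] using h

theorem pvBPmin_eq_aux :
    ∀ (l acc : List Int) (m : Int),
      List.foldl
        (fun pmin x =>
          pmin ++ [match pmin.getLast? with
                   | none => x
                   | some m => if x < m then x else m])
        (acc ++ [m]) l = acc ++ [m] ++ pvPM m l := by
  intro l
  induction l with
  | nil => intro acc m; simp [pvPM]
  | cons x xs ih =>
    intro acc m
    have hl : (acc ++ [m]).getLast? = some m := by simp
    simp only [List.foldl_cons, hl]
    have h2 := ih (acc ++ [m]) (if x < m then x else m)
    rw [h2]
    simp [pvPM]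

theorem pvBPmin_cons (x : Int) (l : List Int) :
    pvBPmin (x :: l) = x :: pvPM x l := by
  have h := pvBPmin_eq_aux l [] x
  simpa [pvBPmin] using h

/-- A's loop counts exactly the `s < ·` prefix of the adjacent-dedup list. -/
theorem pvALoop_eq (s : Int) :
    ∀ (l : List Int) (x : Int) (c : Int),
      pvALoop s (x :: l) c = c + (pvTW s (x :: pvDA x l) : Int) := by
  intro l
  induction l with
  | nil =>
    intro x c
    by_cases hs : s < x <;> simp [pvALoop, pvDA, pvTW, List.takeWhile, hs]
  | cons y rest ih =>
    intro x c
    by_cases hs : s < x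
    · by_cases hxy : x = y
      · have h1 : pvALoop s (x :: y :: rest) c = pvALoop s (y :: rest) c := by
          simp only [pvALoop]; rw [if_pos hs, if_pos hxy]
        rw [h1, ih y c]
        have : pvDA x (y :: rest) = pvDA y rest := by
          simp [pvDA, hxy.symm]
        rw [this, hxy]
      · have h1 : pvALoop s (x :: y :: rest) c = pvALoop s (y :: rest) (c + 1) := by
          simp only [pvALoop]; rw [if_pos hs, if_neg hxy]
        rw [h1, ih y (c + 1)]
        have hda : pvDA x (y :: rest) = y :: pvDA y rest := by
          simp only [pvDA]; rw [if_neg (fun h : y = x => hxy h.symm)]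
        rw [hda]
        simp [pvTW, List.takeWhile, hs]
        ring
    · simp [pvALoop, hs, pvTW, List.takeWhile]

/-- every element of the prefix-min list is ≤ the running minimum. -/
theorem pvPM_le (m : Int) : ∀ l, ∀ y ∈ pvPM m l, y ≤ m := by
  intro l
  induction l generalizing m with
  | nil => simp [pvPM]
  | cons x xs ih =>
    intro y hy
    simp only [pvPM, List.mem_cons] at hy
    rcases hy with h | h
    · subst h; split <;> omega
    · have := ih (if x < m then x else m) y h
      split at this <;> omega

/-- the prefix-min list is antitone (indices). -/
theorem pvPM_anti (m : Int) : ∀ (l : List Int) (i j : Nat)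
    (hi : i < (pvPM m l).length) (hj : j < (pvPM m l).length),
    i ≤ j → (pvPM m l)[j] ≤ (pvPM m l)[i] := by
  intro l
  induction l generalizing m with
  | nil => simp [pvPM]
  | cons x xs ih =>
    intro i j hi hj hij
    simp only [pvPM] at hi hj ⊢
    match i, j with
    | 0, 0 => simp
    | 0, j + 1 =>
      simp only [List.getElem_cons_zero, List.getElem_cons_succ]
      exact pvPM_le _ _ _ (List.getElem_mem _)
    | i + 1, j + 1 =>
      simp only [List.getElem_cons_succ]
      exact ih _ i j (by simpa using hi) (by simpa using hj) (by omega)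

-- basic takeWhile-prefix facts
theorem pvTW_le (s : Int) : ∀ l : List Int, pvTW s l ≤ l.length := by
  intro l
  induction l with
  | nil => simp [pvTW]
  | cons x xs ih =>
    by_cases hs : s < x <;> simp [pvTW, List.takeWhile, hs] <;> simpa [pvTW] using ih

theorem pvTW_lt (s : Int) : ∀ (l : List Int) (i : Nat) (h : i < l.length),
    i < pvTW s l → s < l[i] := by
  intro l
  induction l with
  | nil => simp
  | cons x xs ih =>
    intro i h hi
    by_cases hs : s < x
    · match i with
      | 0 => simpa using hs
      | i + 1 =>
        simp only [List.getElem_cons_succ]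
        apply ih
        simp only [pvTW, List.takeWhile, hs] at hi
        simp only [decide_true] at hi
        simpa [pvTW] using Nat.lt_of_succ_lt_succ (by simpa using hi)
    · simp [pvTW, List.takeWhile, hs] at hi
      
theorem pvTW_stop (s : Int) : ∀ (l : List Int) (h : pvTW s l < l.length),
    l[pvTW s l] ≤ s := by
  intro l
  induction l with
  | nil => simp
  | cons x xs ih =>
    intro h
    by_cases hs : s < x
    · have htw : pvTW s (x :: xs) = pvTW s xs + 1 := by
        simp [pvTW, List.takeWhile, hs]
      simp only [htw, List.getElem_cons_succ]
      exact ih (by rw [htw] at h; simpa using Nat.lt_of_succ_lt_succ h)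
    · have htw : pvTW s (x :: xs) = 0 := by
        simp [pvTW, List.takeWhile, hs]
      simp only [htw, List.getElem_cons_zero]
      omega

/-- binary search invariant: if N = pvTW s pmin lies in [lo, hi] and pmin's prefix/stop
facts hold, the search returns N. -/
theorem pvBSearch_eq (pmin : List Int) (s : Int)
    (hanti : ∀ i j (hi : i < pmin.length) (hj : j < pmin.length),
      i ≤ j → pmin[j] ≤ pmin[i]) :
    ∀ (lo hi : Nat), hi ≤ pmin.length → lo ≤ pvTW s pmin → pvTW s pmin ≤ hi →
      pvBSearch pmin s lo hi = pvTW s pmin := by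
  intro lo hi
  induction hfuel : hi - lo using Nat.strong_induction_on generalizing lo hi with
  | _ n ihn =>
    intro hhi hlo hhiN
    rw [pvBSearch]
    by_cases hlh : lo < hi
    · rw [dif_pos hlh]
      set N := pvTW s pmin with hN
      have hmidlt : (lo + hi) / 2 < hi := by omega
      have hmidge : lo ≤ (lo + hi) / 2 := by omega
      have hmidlen : (lo + hi) / 2 < pmin.length := by omega
      have hget : pmin.getD ((lo + hi) / 2) 0 = pmin[(lo + hi) / 2] := by
        rw [List.getD_eq_getElem?_getD, List.getElem?_eq_getElem hmidlen]; rfl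
      by_cases hc : s < pmin.getD ((lo + hi) / 2) 0
      · rw [if_pos hc]
        -- mid < N: otherwise pmin[mid] ≤ pmin[N] ... ≤ s
        have hmidN : (lo + hi) / 2 < N := by
          by_contra hcon
          push Not at hcon
          have hNlen : N < pmin.length := by omega
          have h1 : pmin[(lo + hi) / 2] ≤ pmin[N] := hanti N _ hNlen hmidlen hcon
          have h2 : pmin[N] ≤ s := pvTW_stop s pmin hNlen
          rw [hget] at hc; omega
        exact ihn (hi - ((lo + hi) / 2 + 1)) (by omega) _ _ rfl hhi (by omega) hhiN
      · rw [if_neg hc]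
        -- N ≤ mid: otherwise s < pmin[mid]
        have hNmid : N ≤ (lo + hi) / 2 := by
          by_contra hcon
          push Not at hcon
          have := pvTW_lt s pmin _ hmidlen hcon
          rw [hget] at hc; omega
        exact ihn ((lo + hi) / 2 - lo) (by omega) _ _ rfl (by omega) hlo hNmid
    · rw [dif_neg hlh]; omega

/-- prefix-min preserves the strict prefix length when the running min is above s. -/
theorem pvTW_pvPM (s : Int) : ∀ (l : List Int) (m : Int), s < m →
    pvTW s (pvPM m l) = pvTW s l := by
  intro l
  induction l with
  | nil => intro m _; simp [pvPM]
  | cons x xs ih =>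
    intro m hm
    by_cases hx : s < x
    · have hm' : s < (if x < m then x else m) := by split <;> omega
      simp only [pvPM, pvTW, List.takeWhile, hm', hx, decide_true]
      have := ih _ hm'
      simp only [pvTW] at this
      simp [this]
    · have hm' : ¬ s < (if x < m then x else m) := by
        split
        · omega
        · next hcon => omega
      simp [pvPM, pvTW, List.takeWhile, hx, hm']

theorem pvPointwise (lb : List Int) (s : Int) :
    pvALoop s lb 0 + 1 =
      (pvBSearch (pvBPmin (pvBDedup lb)) s 0 (pvBPmin (pvBDedup lb)).length : Int) + 1 := by
  match lb with
  | [] => simp [pvALoop, pvBDedup, pvBPmin, pvBSearch]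
  | x :: l =>
    rw [pvALoop_eq s l x 0, pvBDedup_cons, pvBPmin_cons]
    set P := x :: pvPM x (pvDA x l) with hP
    have hanti : ∀ i j (hi : i < P.length) (hj : j < P.length), i ≤ j → P[j] ≤ P[i] := by
      intro i j hi hj hij
      match i, j with
      | 0, 0 => simp
      | 0, j + 1 =>
        simp only [hP, List.getElem_cons_zero, List.getElem_cons_succ]
        exact pvPM_le _ _ _ (List.getElem_mem _)
      | i + 1, j + 1 =>
        simp only [hP, List.getElem_cons_succ]
        exact pvPM_anti x (pvDA x l) i j (by simpa [hP] using hi) (by simpa [hP] using hj) (by omega)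
    have hbs := pvBSearch_eq P s hanti 0 P.length le_rfl (Nat.zero_le _) (pvTW_le s P)
    rw [hbs]
    -- pvTW s P = pvTW s (x :: pvDA x l)
    have hTW : pvTW s P = pvTW s (x :: pvDA x l) := by
      by_cases hx : s < x
      · simp only [hP, pvTW, List.takeWhile, hx, decide_true]
        have := pvTW_pvPM s (pvDA x l) x hx
        simp only [pvTW] at this
        simp [this]
      · simp [hP, pvTW, List.takeWhile, hx]
    rw [hTW]
    omega

-- ===== VERDICT (by name: the statement is the Claim_ definition above) =====
theorem rank_after_each_round_spec : Claim_equal_rank_after_each_round := by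
  intro lb ps _
  unfold Spec_rank_after_each_round rank_after_each_round rank_after_each_round_alt
  simp only []
  apply List.map_congr_left
  intro s _
  exact pvPointwise lb s
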